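-- pv_equiv track=rewrite | github.com/ydnyshhh/rlvr-gym | src/rlvr_gym/families/sokoban.py | _transform_rows
-- ===== SOURCE A (Python) =====
-- def _transform_rows(rows: tuple[str, ...], variant: str) -> tuple[str, ...]:
--     if variant == "flip_horizontal":
--         return tuple(row[::-1] for row in rows)
--     if variant == "flip_vertical":
--         return tuple(reversed(rows))
--     if variant == "flip_both":
--         return tuple(row[::-1] for row in reversed(rows))
--     return rows
-- ===== SOURCE B (Python) =====
-- def _transform_rows(rows: tuple[str, ...], variant: str) -> tuple[str, ...]:
--     fh = variant in ("flip_horizontal", "flip_both")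
--     fv = variant in ("flip_vertical", "flip_both")
--     out = []
--     for row in rows:
--         if fh:
--             s = ""
--             for ch in row:
--                 s = ch + s
--             new = s
--         else:
--             new = row
--         if fv:
--             out.insert(0, new)
--         else:
--             out.append(new)
--     return tuple(out)
-- ===== Notes on version B (the rewrite author's own statement) =====
-- stated objective: alternative
-- what changed: Single left-to-right pass with an accumulator: each row is (optionally) reversed by an explicit character-prepend loop instead of slicing, and the vertical flip is realised by prepending rows to the output instead of a separate reversed() pass over the whole tuple.
import Mathlib
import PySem

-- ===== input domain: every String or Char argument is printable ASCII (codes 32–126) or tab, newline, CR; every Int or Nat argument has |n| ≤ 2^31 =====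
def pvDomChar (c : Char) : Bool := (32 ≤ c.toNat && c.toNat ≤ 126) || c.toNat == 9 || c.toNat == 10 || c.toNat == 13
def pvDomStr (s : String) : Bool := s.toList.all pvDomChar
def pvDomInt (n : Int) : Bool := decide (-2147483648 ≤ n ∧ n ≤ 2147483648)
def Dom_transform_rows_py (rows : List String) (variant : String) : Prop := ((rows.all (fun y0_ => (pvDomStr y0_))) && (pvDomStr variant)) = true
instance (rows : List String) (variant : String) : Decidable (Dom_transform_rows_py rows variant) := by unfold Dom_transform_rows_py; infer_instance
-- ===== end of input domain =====

-- B replaces A's four mutually-exclusive whole-pass branches by ONE left-to-right pass with an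
-- accumulator: rows are prepended (vertical flip) or appended, and each row is reversed by an
-- explicit character-prepend loop instead of slicing (objective: alternative).
-- ===== PORT A =====
-- row[::-1] ported exactly via PySem.Str.slice? (step -1 never returns none; getD is a total unwrap)
def transform_rows_py (rows : List String) (variant : String) : List String :=
  if variant == "flip_horizontal" then
    rows.map (fun row => (PySem.Str.slice? row none none (-1)).getD row)
  else if variant == "flip_vertical" then
    rows.reverse
  else if variant == "flip_both" then
    rows.reverse.map (fun row => (PySem.Str.slice? row none none (-1)).getD row)
  else
    rows

-- ===== PORT B =====
-- the inner loop 's = ch + s' is ported on code points (exact): a char-prepend fold, then back to String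
def transform_rows_py_alt (rows : List String) (variant : String) : List String :=
  let fh := variant == "flip_horizontal" || variant == "flip_both"
  let fv := variant == "flip_vertical" || variant == "flip_both"
  rows.foldl
    (fun out row =>
      let new := if fh then String.ofList (row.toList.foldl (fun s c => c :: s) []) else row
      if fv then new :: out else out ++ [new])
    []

-- ===== PRECONDITION & SPEC =====
def Spec_transform_rows_py (rows : List String) (variant : String) (out : List String) : Prop := out = transform_rows_py_alt rows variant
instance (rows : List String) (variant : String) (out : List String) : Decidable (Spec_transform_rows_py rows variant out) := by unfold Spec_transform_rows_py; infer_instance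

-- ===== CLAIM =====
def Claim_equal_transform_rows_py : Prop := ∀ (rows : List String) (variant : String), Dom_transform_rows_py rows variant → Spec_transform_rows_py rows variant (transform_rows_py rows variant)

-- ===== LEMMAS AND PROOFS =====
theorem pv_foldl_cons_rev {α : Type} (l acc : List α) :
    l.foldl (fun s c => c :: s) acc = l.reverse ++ acc := by
  induction l generalizing acc with
  | nil => simp
  | cons x xs ih => simp [List.foldl, ih]

theorem pv_foldl_append {α β : Type} (f : α → β) (l : List α) (acc : List β) :
    l.foldl (fun out row => out ++ [f row]) acc = acc ++ l.map f := by
  induction l generalizing acc with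
  | nil => simp
  | cons x xs ih => simp [List.foldl, ih]

theorem pv_foldl_prepend {α β : Type} (f : α → β) (l : List α) (acc : List β) :
    l.foldl (fun out row => f row :: out) acc = (l.map f).reverse ++ acc := by
  induction l generalizing acc with
  | nil => simp
  | cons x xs ih => simp [List.foldl, ih]

theorem pv_row_rev (row : String) :
    (PySem.Str.slice? row none none (-1)).getD row = String.ofList (row.toList.foldl (fun s c => c :: s) []) := by
  rw [PySem.Str.slice?_none_none_neg_one, pv_foldl_cons_rev]
  simp

theorem pv_flatten_singleton {α β : Type} (f : α → β) (l : List α) :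
    (l.map (fun x => [f x])).flatten = l.map f := by
  induction l with
  | nil => rfl
  | cons x xs ih => simp [List.map, List.flatten, ih]

-- ===== VERDICT =====
theorem transform_rows_py_spec : Claim_equal_transform_rows_py := by
  intro rows variant _
  unfold Spec_transform_rows_py transform_rows_py transform_rows_py_alt
  by_cases h1 : variant = "flip_horizontal" <;>
  by_cases h2 : variant = "flip_vertical" <;>
  by_cases h3 : variant = "flip_both" <;>
  simp_all [pv_foldl_append, pv_foldl_prepend, pv_row_rev, List.map_reverse, pv_flatten_singleton]
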